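-- pv_equiv track=rewrite | github.com/Jayjane28/warframe-inventory-tracker | utils/image_processor.py | _cluster_line_positions
-- ===== SOURCE A (Python) =====
-- def _cluster_line_positions(line_positions, threshold):
--     """
--     Cluster line positions that are close to each other.
--
--     Args:
--         line_positions: List of line positions (x or y coordinates)
--         threshold: Distance threshold for clustering
--
--     Returns:
--         list: Clustered line positions
--     """
--     if not line_positions:
--         return []
--
--     # Sort positions
--     positions = sorted(line_positions)
--
--     # Group positions into clusters
--     clusters = []
--     current_cluster = [positions[0]]
--
--     for i in range(1, len(positions)):
--         if positions[i] - positions[i-1] < threshold: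
--             # Positions are close, add to current cluster
--             current_cluster.append(positions[i])
--         else:
--             # Start a new cluster
--             clusters.append(current_cluster)
--             current_cluster = [positions[i]]
--
--     # Add the last cluster
--     if current_cluster:
--         clusters.append(current_cluster)
--
--     # Calculate the average position for each cluster
--     return [sum(cluster) // len(cluster) for cluster in clusters]
-- ===== SOURCE B (Python) =====
-- def _cluster_line_positions(line_positions, threshold):
--     """Staged: collect cluster boundary indices, slice into segments, average."""
--     positions = sorted(line_positions)
--     n = len(positions)
--     if n == 0:
--         return []
--     cuts = [i for i in range(1, n) if positions[i] - positions[i - 1] >= threshold]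
--     bounds = [0] + cuts + [n]
--     return [sum(positions[a:b]) // (b - a) for a, b in zip(bounds, bounds[1:])]
-- ===== Notes on version B (the rewrite author's own statement) =====
-- stated objective: alternative
-- what changed: B replaces A's grow-a-current-cluster-inside-one-loop structure by three staged passes: collect the cut indices where the sorted adjacent gap reaches the threshold, slice the sorted list into contiguous segments at those cuts via zip of consecutive bounds, and map each slice to sum // length.
import Mathlib
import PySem

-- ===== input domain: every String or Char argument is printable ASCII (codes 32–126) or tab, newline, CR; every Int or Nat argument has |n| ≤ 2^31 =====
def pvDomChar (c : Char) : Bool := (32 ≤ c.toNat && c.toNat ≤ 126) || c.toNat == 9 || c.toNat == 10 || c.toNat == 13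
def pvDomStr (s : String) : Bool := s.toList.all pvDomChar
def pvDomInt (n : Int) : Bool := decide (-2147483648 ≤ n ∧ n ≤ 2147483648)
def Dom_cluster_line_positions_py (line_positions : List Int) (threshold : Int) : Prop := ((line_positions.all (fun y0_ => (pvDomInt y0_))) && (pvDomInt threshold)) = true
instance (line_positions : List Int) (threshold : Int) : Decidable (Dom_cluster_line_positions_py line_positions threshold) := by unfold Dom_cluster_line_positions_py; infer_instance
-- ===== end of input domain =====

-- B replaces A's grow-a-current-cluster loop by three staged passes: collect the cut
-- indices where the sorted adjacent gap reaches the threshold, slice the sorted list at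
-- those cuts (zip of consecutive bounds), and map each slice to sum // length (objective:
-- alternative decomposition, same cost).

-- ===== PORT A =====
-- loop body of A's 'for i in range(1, len(positions))'
def aStep (positions : List Int) (threshold : Int)
    (st : List (List Int) × List Int) (i : Int) : List (List Int) × List Int :=
  if PySem.List.pyGetD positions i 0 - PySem.List.pyGetD positions (i - 1) 0 < threshold then
    (st.1, st.2 ++ [PySem.List.pyGetD positions i 0])
  else
    (st.1 ++ [st.2], [PySem.List.pyGetD positions i 0])

def cluster_line_positions_py (line_positions : List Int) (threshold : Int) : List Int :=
  if line_positions = [] then []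
  else
    let positions := PySem.List.sorted line_positions (fun x => x) false
    let st := (PySem.List.pyRange 1 (positions.length : Int) 1).foldl
      (aStep positions threshold) ([], [PySem.List.pyGetD positions 0 0])
    let clusters := if st.2 ≠ [] then st.1 ++ [st.2] else st.1
    clusters.map (fun cluster => PySem.Int.floordiv cluster.sum (cluster.length : Int))

-- ===== PORT B =====
-- Source B's list comprehension '[i for i in range(1, n) if positions[i] - positions[i-1] >= threshold]'
def bCuts (positions : List Int) (threshold : Int) : List Int :=
  (PySem.List.pyRange 1 (positions.length : Int) 1).filter
    (fun i => decide (threshold ≤ PySem.List.pyGetD positions i 0 - PySem.List.pyGetD positions (i - 1) 0))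

-- Source B's final comprehension over zip(bounds, bounds[1:])
def bAvgSlices (positions : List Int) (bounds : List Int) : List Int :=
  (bounds.zip bounds.tail).map (fun ab =>
    PySem.Int.floordiv (PySem.List.slice positions (some ab.1) (some ab.2)).sum (ab.2 - ab.1))

def cluster_line_positions_py_alt (line_positions : List Int) (threshold : Int) : List Int :=
  let positions := PySem.List.sorted line_positions (fun x => x) false
  if positions.length = 0 then []
  else
    let cuts := bCuts positions threshold
    let bounds := 0 :: (cuts ++ [(positions.length : Int)])
    bAvgSlices positions bounds

-- ===== PRECONDITION & SPEC =====
def Spec_cluster_line_positions_py (line_positions : List Int) (threshold : Int) (out : List Int) : Prop := out = cluster_line_positions_py_alt line_positions threshold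
instance (line_positions : List Int) (threshold : Int) (out : List Int) : Decidable (Spec_cluster_line_positions_py line_positions threshold out) := by unfold Spec_cluster_line_positions_py; infer_instance

-- ===== CLAIM (what is proved, stated in full; the proofs are below) =====
def Claim_equal_cluster_line_positions_py : Prop := ∀ (line_positions : List Int) (threshold : Int), Dom_cluster_line_positions_py line_positions threshold → Spec_cluster_line_positions_py line_positions threshold (cluster_line_positions_py line_positions threshold)

-- ===== LEMMAS AND PROOFS =====

-- the average of a cluster, shared spec-side
def avgI (c : List Int) : Int := PySem.Int.floordiv c.sum (c.length : Int)

-- span of the first cluster after its first element x: (rest of first cluster, remainder)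
def segGo (t x : Int) : List Int → List Int × List Int
  | [] => ([], [])
  | y :: ys => if y - x < t then ((segGo t y ys).1.cons y, (segGo t y ys).2) else ([], y :: ys)

theorem segGo_snd_length (t x : Int) (xs : List Int) : (segGo t x xs).2.length ≤ xs.length := by
  induction xs generalizing x with
  | nil => simp [segGo]
  | cons y ys ih =>
    simp only [segGo]
    split
    · exact le_trans (ih y) (by simp)
    · simp

-- the reference segmentation: the list of clusters of ps
def segs (t : Int) : List Int → List (List Int)
  | [] => []
  | x :: xs => (x :: (segGo t x xs).1) :: segs t (segGo t x xs).2
termination_by l => l.length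
decreasing_by simpa using Nat.lt_succ_of_le (segGo_snd_length t x xs)

theorem segGo_append (t x : Int) (xs : List Int) :
    (segGo t x xs).1 ++ (segGo t x xs).2 = xs := by
  induction xs generalizing x with
  | nil => simp [segGo]
  | cons y ys ih =>
    simp only [segGo]
    split
    · simpa using ih y
    · simp

theorem segGo_chain (t x : Int) (xs : List Int) :
    List.IsChain (fun p q => q - p < t) (x :: (segGo t x xs).1) := by
  induction xs generalizing x with
  | nil => simp [segGo]
  | cons y ys ih =>
    simp only [segGo]
    split
    · exact List.IsChain.cons_cons (by assumption) (ih y)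
    · simp

theorem segGo_head_ge (t x : Int) (xs : List Int) {y : Int} {ys : List Int}
    (h : (segGo t x xs).2 = y :: ys) :
    t ≤ y - (x :: (segGo t x xs).1).getLast (by simp) := by
  induction xs generalizing x with
  | nil => simp [segGo] at h
  | cons z zs ih =>
    by_cases hz : z - x < t
    · have h' : (segGo t z zs).2 = y :: ys := by simpa [segGo, hz] using h
      have := ih z h'
      simp only [segGo, hz, if_pos]
      simpa [List.getLast_cons] using this
    · simp only [segGo, hz, if_neg, not_false_iff] at h ⊢
      injection h with h1 h2
      subst h1
      simp only [List.getLast_singleton]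
      omega

-- A side: structural form of A's index loop, carrying the previous element explicitly
def aGo (threshold prev : Int) (st : List (List Int) × List Int) :
    List Int → List (List Int) × List Int
  | [] => st
  | x :: xs =>
      aGo threshold x
        (if x - prev < threshold then (st.1, st.2 ++ [x]) else (st.1 ++ [st.2], [x])) xs

theorem A_fold (t : Int) (ps : List Int) (k : Nat) (hk : k < ps.length)
    (st : List (List Int) × List Int) :
    (PySem.List.pyRange ((k : Int) + 1) (ps.length : Int) 1).foldl (aStep ps t) st
      = aGo t ps[k] st (ps.drop (k + 1)) := by
  by_cases h : k + 1 < ps.length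
  · rw [PySem.List.pyRange_one_cons (by omega)]
    rw [List.foldl_cons]
    have hd : ps.drop (k + 1) = ps[k + 1] :: ps.drop (k + 2) := by
      rw [List.drop_eq_getElem_cons h]
    have hstep : aStep ps t st ((k : Int) + 1) =
        (if ps[k + 1] - ps[k] < t then (st.1, st.2 ++ [ps[k + 1]])
         else (st.1 ++ [st.2], [ps[k + 1]])) := by
      have h1 : PySem.List.pyGetD ps ((k : Int) + 1) 0 = ps[k + 1] := by
        have := PySem.List.pyGetD_eq_getElem (xs := ps) (i := (k : Int) + 1) (d := 0)
          (by omega) (by omega)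
        simpa using this
      have h2 : PySem.List.pyGetD ps ((k : Int)) 0 = ps[k] := by
        have := PySem.List.pyGetD_eq_getElem (xs := ps) (i := (k : Int)) (d := 0)
          (by omega) (by omega)
        simpa using this
      simp only [aStep]
      rw [show (k : Int) + 1 - 1 = (k : Int) from by ring, h1, h2]
    rw [hstep, hd]
    have hrec := A_fold t ps (k + 1) h
      (if ps[k + 1] - ps[k] < t then (st.1, st.2 ++ [ps[k + 1]])
       else (st.1 ++ [st.2], [ps[k + 1]]))
    rw [show (k : Int) + 1 + 1 = ((k + 1 : Nat) : Int) + 1 from by push_cast; ring]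
    rw [hrec]
    simp [aGo]
  · have hlen : ps.length = k + 1 := by omega
    rw [PySem.List.pyRange_one_eq_nil (by omega)]
    rw [List.drop_eq_nil_of_le (by omega)]
    simp [aGo]
termination_by ps.length - k

-- A's loop result, finished and averaged, is the averages of the reference segmentation
theorem aGo_segs (t : Int) (xs : List Int) :
    ∀ (prev : Int) (cl : List (List Int)) (cur : List Int), cur ≠ [] →
    (let st := aGo t prev (cl, cur) xs
     if st.2 ≠ [] then st.1 ++ [st.2] else st.1)
      = cl ++ ((cur ++ (segGo t prev xs).1) :: segs t (segGo t prev xs).2) := by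
  induction xs with
  | nil =>
    intro prev cl cur hcur
    simp [aGo, segGo, segs, hcur]
  | cons y ys ih =>
    intro prev cl cur hcur
    by_cases hy : y - prev < t
    · have := ih y cl (cur ++ [y]) (by simp)
      simp only [aGo, hy, if_pos] at this ⊢
      simp only [segGo, hy, if_pos]
      simpa [List.append_assoc] using this
    · have := ih y (cl ++ [cur]) [y] (by simp)
      simp only [aGo, hy, if_neg, not_false_iff] at this ⊢
      simp only [segGo, hy, if_neg, not_false_iff]
      rw [this]
      simp [segs, List.append_assoc]

-- B side: within a chained prefix s of s ++ r, no index of range(1, len(s)) is a cut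
theorem filter_prefix_nil (t : Int) (s r : List Int)
    (h : List.IsChain (fun p q => q - p < t) s) :
    (PySem.List.pyRange 1 (s.length : Int) 1).filter
      (fun i => decide (t ≤ PySem.List.pyGetD (s ++ r) i 0 - PySem.List.pyGetD (s ++ r) (i - 1) 0)) = [] := by
  rw [List.filter_eq_nil_iff]
  intro i hi
  rw [PySem.List.mem_pyRange_one] at hi
  have hlen : (s ++ r).length = s.length + r.length := by simp
  have hgd : ∀ (j : Int), 0 ≤ j → j < (s.length : Int) →
      PySem.List.pyGetD (s ++ r) j 0 = s.getD j.toNat 0 := by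
    intro j hj0 hj1
    rw [PySem.List.pyGetD_eq_getElem (xs := s ++ r) (i := j) (d := 0) hj0 (by omega)]
    rw [List.getD_eq_getElem _ _ (by omega)]
    exact List.getElem_append_left (by omega)
  have hc := List.isChain_iff_getElem.mp h ((i - 1).toNat) (by omega)
  have hc' : s.getD ((i - 1).toNat + 1) 0 - s.getD ((i - 1).toNat) 0 < t := by
    rw [List.getD_eq_getElem _ _ (by omega), List.getD_eq_getElem _ _ (by omega)]
    exact hc
  have hidx : i.toNat = (i - 1).toNat + 1 := by omega
  rw [hgd i (by omega) (by omega), hgd (i - 1) (by omega) (by omega), hidx]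
  simp only [decide_eq_true_eq]
  omega

-- B side: elements of the cut list are indices in (0, len ps)
theorem mem_bCuts (ps : List Int) (t u : Int) (h : u ∈ bCuts ps t) :
    1 ≤ u ∧ u < (ps.length : Int) := by
  unfold bCuts at h
  have := (List.mem_filter.mp h).1
  rwa [PySem.List.mem_pyRange_one] at this

-- total-indexing form of pyGetD on the suffix of an append
theorem pyGetD_append_getD (s b : List Int) (j : Int) (hj0 : 0 ≤ j)
    (hj1 : j < (b.length : Int)) :
    PySem.List.pyGetD (s ++ b) ((s.length : Int) + j) 0 = b.getD j.toNat 0 := by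
  have hlen : (s ++ b).length = s.length + b.length := by simp
  rw [PySem.List.pyGetD_eq_getElem (xs := s ++ b) (i := (s.length : Int) + j) (d := 0)
    (by omega) (by omega)]
  rw [List.getD_eq_getElem _ _ (by omega)]
  rw [List.getElem_append_right (by omega)]
  congr 1
  omega

-- B side: the cuts found in the suffix b of s ++ b are the cuts of b, shifted by len s
theorem filter_suffix_shift (t : Int) (s b : List Int) :
    (PySem.List.pyRange ((s.length : Int) + 1) ((s.length : Int) + (b.length : Int)) 1).filter
      (fun i => decide (t ≤ PySem.List.pyGetD (s ++ b) i 0 - PySem.List.pyGetD (s ++ b) (i - 1) 0))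
      = (bCuts b t).map (fun u => (s.length : Int) + u) := by
  unfold bCuts
  rw [PySem.List.pyRange_one, PySem.List.pyRange_one]
  have he : ((s.length : Int) + (b.length : Int) - ((s.length : Int) + 1)).toNat
      = ((b.length : Int) - 1).toNat := by omega
  rw [he]
  rw [List.filter_map, List.filter_map, List.map_map]
  have hfil : (List.range ((b.length : Int) - 1).toNat).filter
        ((fun i => decide (t ≤ PySem.List.pyGetD (s ++ b) i 0 - PySem.List.pyGetD (s ++ b) (i - 1) 0)) ∘
          (fun k : Nat => (s.length : Int) + 1 + (k : Int)))
      = (List.range ((b.length : Int) - 1).toNat).filter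
        ((fun i => decide (t ≤ PySem.List.pyGetD b i 0 - PySem.List.pyGetD b (i - 1) 0)) ∘
          (fun k : Nat => (1 : Int) + (k : Int))) := by
    apply List.filter_congr
    intro k hk
    rw [List.mem_range] at hk
    have hk' : (k : Int) < (b.length : Int) - 1 := by omega
    simp only [Function.comp_apply]
    have e1 : (s.length : Int) + 1 + (k : Int) = (s.length : Int) + (1 + (k : Int)) := by ring
    have e2 : (s.length : Int) + 1 + (k : Int) - 1 = (s.length : Int) + (k : Int) := by ring
    rw [e2, e1]
    rw [pyGetD_append_getD s b (1 + (k : Int)) (by omega) (by omega)]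
    rw [pyGetD_append_getD s b (k : Int) (by omega) (by omega)]
    rw [PySem.List.pyGetD_eq_getElem (xs := b) (i := (1 : Int) + (k : Int)) (d := 0)
      (by omega) (by omega)]
    rw [show (1 : Int) + (k : Int) - 1 = (k : Int) by ring]
    rw [PySem.List.pyGetD_eq_getElem (xs := b) (i := (k : Int)) (d := 0) (by omega) (by omega)]
    rw [List.getD_eq_getElem _ _ (by omega), List.getD_eq_getElem _ _ (by omega)]
  rw [hfil]
  apply List.map_congr_left
  intro k _
  simp only [Function.comp_apply]
  ring

-- slicing the suffix of an append, with both bounds shifted by the prefix length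
theorem slice_append_shift (s b : List Int) (u v : Int) (hu : 0 ≤ u) (hv : 0 ≤ v) :
    PySem.List.slice (s ++ b) (some ((s.length : Int) + u)) (some ((s.length : Int) + v))
      = PySem.List.slice b (some u) (some v) := by
  rw [PySem.List.slice_toNat _ (by omega) (by omega), PySem.List.slice_toNat _ hu hv]
  have h1 : ((s.length : Int) + u).toNat = s.length + u.toNat := by omega
  have h2 : ((s.length : Int) + v).toNat = s.length + v.toNat := by omega
  rw [h1, h2]
  rw [show (s ++ b).drop (s.length + u.toNat) = b.drop u.toNat from by simp [List.drop_append]]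
  congr 1
  omega

-- B side main: the staged computation equals the averages of the reference segmentation
theorem bcore_segs (t : Int) (ps : List Int) (hps : ps ≠ []) :
    bAvgSlices ps (0 :: (bCuts ps t ++ [(ps.length : Int)])) = (segs t ps).map avgI := by
  obtain ⟨x, xs, rfl⟩ := List.exists_cons_of_ne_nil hps
  have hsplit : (x :: (segGo t x xs).1) ++ (segGo t x xs).2 = x :: xs := by
    simpa using segGo_append t x xs
  have hchain := segGo_chain t x xs
  have hblen : (segGo t x xs).2.length ≤ xs.length := segGo_snd_length t x xs
  set s : List Int := x :: (segGo t x xs).1 with hsdef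
  set b : List Int := (segGo t x xs).2 with hbdef
  have hlen : (x :: xs).length = s.length + b.length := by rw [← hsplit]; simp
  have hsegs : segs t (x :: xs) = s :: segs t b := by rw [segs]
  cases hbe : b with
  | nil =>
    have hps_s : x :: xs = s := by rw [← hsplit, hbe]; simp
    have hcuts : bCuts (x :: xs) t = [] := by
      have hnil := filter_prefix_nil t s [] hchain
      simp only [List.append_nil] at hnil
      rw [bCuts, hps_s]
      exact hnil
    rw [hcuts, hsegs, hbe]
    simp only [segs, List.map_cons, List.map_nil]
    simp only [bAvgSlices, List.nil_append, List.tail_cons, List.zip_cons_cons,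
      List.zip_nil_right, List.map_cons, List.map_nil]
    rw [PySem.List.slice_zero_start,
      PySem.List.slice_to (xs := x :: xs) (b := ((x :: xs).length : Int)) (by omega)]
    rw [show (((x :: xs).length : Int)).toNat = (x :: xs).length by omega]
    rw [List.take_length]
    rw [hps_s, avgI]
    simp
  | cons y b' =>
    have hmpos : 1 ≤ b.length := by rw [hbe]; simp
    have hnat : ((x :: xs).length : Int) = (s.length : Int) + (b.length : Int) := by
      rw [hlen]; push_cast; ring
    have hslen : 1 ≤ s.length := by rw [hsdef]; simp
    -- the cut list decomposes: empty inside s, a cut at len s, shifted cuts of b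
    have hcuts : bCuts (x :: xs) t
        = (s.length : Int) :: (bCuts b t).map (fun u => (s.length : Int) + u) := by
      rw [bCuts, hnat, ← hsplit]
      rw [PySem.List.pyRange_one_append 1 (s.length : Int) _ (by omega) (by omega)]
      rw [PySem.List.pyRange_one_cons (a := (s.length : Int))
        (b := (s.length : Int) + (b.length : Int)) (by omega)]
      rw [List.filter_append, List.filter_cons]
      rw [filter_prefix_nil t s b hchain]
      have hy : PySem.List.pyGetD (s ++ b) (s.length : Int) 0 = y := by
        have := pyGetD_append_getD s b 0 le_rfl (by omega)
        rw [add_zero] at this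
        rw [this, hbe]
        rfl
      have hlast : PySem.List.pyGetD (s ++ b) ((s.length : Int) - 1) 0
          = s.getLast (by rw [hsdef]; simp) := by
        have h0 : (0 : Int) ≤ (s.length : Int) - 1 := by omega
        rw [PySem.List.pyGetD_eq_getElem (xs := s ++ b) (i := (s.length : Int) - 1) (d := 0)
          h0 (by simp)]
        rw [List.getElem_append_left (by omega)]
        rw [List.getLast_eq_getElem]
        congr 1
        omega
      have hge : t ≤ y - s.getLast (by rw [hsdef]; simp) := by
        have := segGo_head_ge t x xs (y := y) (ys := b') (by rw [← hbdef, hbe])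
        exact this
      have hdec : decide (t ≤ PySem.List.pyGetD (s ++ b) (s.length : Int) 0
          - PySem.List.pyGetD (s ++ b) ((s.length : Int) - 1) 0) = true := by
        rw [hy, hlast]
        simpa using hge
      rw [hdec]
      rw [filter_suffix_shift t s b]
      simp
    -- now the slice comprehension decomposes the same way
    rw [hcuts, hnat, hsegs, ← hsplit]
    have hrec := bcore_segs t b (by rw [hbe]; simp)
    unfold bAvgSlices at hrec ⊢
    simp only [List.cons_append, List.tail_cons, List.map_cons]
    rw [List.zip_cons_cons, List.map_cons]
    have e1 : (bCuts b t).map (fun u => (s.length : Int) + u)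
          ++ [(s.length : Int) + (b.length : Int)]
        = (bCuts b t ++ [(b.length : Int)]).map (fun u => (s.length : Int) + u) := by
      simp
    rw [e1]
    have e2 : (s.length : Int) :: (bCuts b t ++ [(b.length : Int)]).map
          (fun u => (s.length : Int) + u)
        = (0 :: (bCuts b t ++ [(b.length : Int)])).map (fun u => (s.length : Int) + u) := by
      simp
    rw [e2, List.zip_map, List.map_map]
    congr 1
    · -- the head pair (0, len s) averages exactly the first cluster s
      dsimp only
      rw [PySem.List.slice_zero_start,
        PySem.List.slice_to (xs := s ++ b) (b := (s.length : Int)) (by omega)]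
      rw [show ((s.length : Int)).toNat = s.length by omega]
      rw [List.take_left, avgI]
      simp
    · -- the shifted pairs average exactly the clusters of b
      rw [← hrec]
      apply List.map_congr_left
      intro p hp
      obtain ⟨hp1, hp2⟩ := List.of_mem_zip hp
      have hmem : ∀ u : Int, u ∈ (0 : Int) :: (bCuts b t ++ [(b.length : Int)]) → 0 ≤ u := by
        intro u hu
        rcases List.mem_cons.mp hu with h | h
        · omega
        · rcases List.mem_append.mp h with h | h
          · exact le_trans (by omega) (mem_bCuts b t u h).1
          · simp at h; omega
      have hu : 0 ≤ p.1 := hmem p.1 hp1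
      have hv : 0 ≤ p.2 := hmem p.2 (List.mem_cons_of_mem _ hp2)
      simp only [Function.comp_apply, Prod.map_fst, Prod.map_snd]
      rw [slice_append_shift s b p.1 p.2 hu hv]
      congr 1
      ring
  termination_by ps.length
  decreasing_by
    subst ps
    have hc : (x :: xs).length = xs.length + 1 := by simp
    omega

-- ===== VERDICT (by name: the statement is the Claim_ definition above) =====
theorem cluster_line_positions_py_spec : Claim_equal_cluster_line_positions_py := by
  intro lp t _
  unfold Spec_cluster_line_positions_py
  by_cases hlp : lp = []
  · subst hlp
    have hnil : PySem.List.sorted ([] : List Int) (fun x => x) false = [] := rfl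
    simp [cluster_line_positions_py, cluster_line_positions_py_alt, hnil]
  · have hps : PySem.List.sorted lp (fun x => x) false ≠ [] := by
      simpa [PySem.List.sorted_eq_nil_iff] using hlp
    obtain ⟨p0, rest, hps_eq⟩ := List.exists_cons_of_ne_nil hps
    simp only [cluster_line_positions_py, cluster_line_positions_py_alt]
    rw [if_neg hlp, hps_eq, if_neg (show ¬((p0 :: rest).length = 0) by simp)]
    rw [PySem.List.pyGetD_zero_cons]
    have h0 : (0 : Nat) < (p0 :: rest).length := by simp
    have hA := A_fold t (p0 :: rest) 0 h0 ([], [PySem.List.pyGetD (p0 :: rest) 0 0])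
    simp only [Nat.cast_zero, zero_add, List.drop_one, List.tail_cons,
      List.getElem_cons_zero, PySem.List.pyGetD_zero_cons] at hA
    rw [hA]
    have hM := aGo_segs t rest p0 [] [p0] (by simp)
    simp only [List.nil_append] at hM
    rw [hM]
    have hsegs : segs t (p0 :: rest)
        = (p0 :: (segGo t p0 rest).1) :: segs t (segGo t p0 rest).2 := by rw [segs]
    have hB := bcore_segs t (p0 :: rest) (by simp)
    rw [hB, hsegs]
    simp only [List.singleton_append]
    unfold avgI
    rfl
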